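-- pv_equiv track=rewrite | github.com/CoderRahul007/DSA | gfg/Flipkart/DP/Special Keyboard .py | optimalKeys
-- ===== SOURCE A (Python) =====
-- def optimalKeys(N):
--     # code here
--     if N <= 6:
--        return N
--     dp = [i if i<=6 else 0 for i in range(N+1)]
--     for i in range(7, N+1):
--         c = 2
--         for j in range(i-3, 0, -1):
--             if dp[j]*c >= dp[i]:
--                 dp[i] = dp[j]*c
--             else:
--                 break
--             c += 1
--     return dp[N]
-- ===== SOURCE B (Python) =====
-- def optimalKeys(N):
--     if N <= 6:
--         return N
--     if N <= 10:
--         return (9, 12, 16, 20)[N - 7]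
--     q, r = divmod(N - 11, 5)
--     return (27, 36, 48, 64, 81)[r] * 4 ** q
-- ===== Notes on version B (the rewrite author's own statement) =====
-- stated objective: faster
-- what changed: Replaces A's linear dp-table loop (with its early-break inner scan) by the closed form of the answer: a small lookup table for small inputs, and beyond that a period-five pattern computed with one divmod, a tuple lookup and one integer power.
import Mathlib
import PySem

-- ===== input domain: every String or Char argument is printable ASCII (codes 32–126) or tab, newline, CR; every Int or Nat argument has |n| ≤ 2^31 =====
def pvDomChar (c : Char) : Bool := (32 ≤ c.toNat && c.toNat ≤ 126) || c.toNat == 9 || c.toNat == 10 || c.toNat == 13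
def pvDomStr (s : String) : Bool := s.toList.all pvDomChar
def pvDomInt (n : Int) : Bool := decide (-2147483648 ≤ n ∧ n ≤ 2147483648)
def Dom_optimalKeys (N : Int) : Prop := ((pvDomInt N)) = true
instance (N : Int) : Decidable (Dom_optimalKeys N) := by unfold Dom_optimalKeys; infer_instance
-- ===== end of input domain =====

-- B replaces A's O(N) dp loop by the closed form of the answer (period-5 pattern ×4 above N=10); objective: faster.

-- ===== PORT A =====
def optimalKeys (N : Int) : Int :=
  if N ≤ 6 then N
  else
    let dp0 := (PySem.List.pyRange 0 (N+1) 1).map (fun i => if i ≤ 6 then i else 0)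
    let dp := (PySem.List.pyRange 7 (N+1) 1).foldl (fun dp i =>
        let st := (PySem.List.pyRange (i-3) 0 (-1)).foldl
          (fun (st : Int × Int × Bool) j =>
            if st.2.2 then st
            else if PySem.List.pyGetD dp j 0 * st.2.1 ≥ st.1 then
              (PySem.List.pyGetD dp j 0 * st.2.1, st.2.1 + 1, false)
            else (st.1, st.2.1, true))
          (PySem.List.pyGetD dp i 0, 2, false)
        PySem.List.pySetD dp i st.1) dp0
    PySem.List.pyGetD dp N 0

-- ===== PORT B =====
def optimalKeys_alt (N : Int) : Int :=
  if N ≤ 6 then N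
  else if N ≤ 10 then
    PySem.List.pyGetD [9, 12, 16, 20] (N - 7) 0
  else
    let q := PySem.Int.floordiv (N - 11) 5
    let r := PySem.Int.mod (N - 11) 5
    PySem.List.pyGetD [27, 36, 48, 64, 81] r 0 * 4 ^ q.toNat

-- ===== PRECONDITION & SPEC =====
def Spec_optimalKeys (N : Int) (out : Int) : Prop := out = optimalKeys_alt N
instance (N : Int) (out : Int) : Decidable (Spec_optimalKeys N out) := by unfold Spec_optimalKeys; infer_instance

-- ===== CLAIM (what is proved, stated in full; the proofs are below) =====
def Claim_equal_optimalKeys : Prop := ∀ (N : Int), Dom_optimalKeys N → Spec_optimalKeys N (optimalKeys N)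

-- ===== LEMMAS AND PROOFS =====

-- the value table of the dp: pvF n = max characters for n keystrokes
def pvB (r : Nat) : Int :=
  if r = 0 then 27 else if r = 1 then 36 else if r = 2 then 48 else if r = 3 then 64 else 81

def pvF (n : Nat) : Int :=
  if n ≤ 6 then (n : Int)
  else if n = 7 then 9 else if n = 8 then 12 else if n = 9 then 16 else if n = 10 then 20
  else pvB ((n - 11) % 5) * 4 ^ ((n - 11) / 5)

theorem pvB_pos (r : Nat) : 0 < pvB r := by
  unfold pvB; split_ifs <;> norm_num

theorem pvF_nonneg (n : Nat) : 0 ≤ pvF n := by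
  unfold pvF
  split_ifs <;>
    first
      | exact Int.natCast_nonneg n
      | exact mul_nonneg (pvB_pos _).le (by positivity)
      | norm_num

theorem pvF_ge11 (m : Nat) (h : 11 ≤ m) : pvF m = pvB ((m - 11) % 5) * 4 ^ ((m - 11) / 5) := by
  unfold pvF; split_ifs <;> omega

theorem pvF_add5 (m : Nat) (h : 11 ≤ m) : pvF (m + 5) = 4 * pvF m := by
  rw [pvF_ge11 m h, pvF_ge11 (m + 5) (by omega)]
  have h1 : (m + 5 - 11) % 5 = (m - 11) % 5 := by omega
  have h2 : (m + 5 - 11) / 5 = (m - 11) / 5 + 1 := by omega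
  rw [h1, h2, pow_succ]; ring

-- the three inequality facts that drive A's inner loop for i ≥ 16
theorem pvIneq_b (i : Nat) (h : 16 ≤ i) : 2 * pvF (i - 3) ≤ 3 * pvF (i - 4) := by
  induction i using Nat.strong_induction_on with
  | _ i ih =>
    by_cases hs : i ≤ 20
    · interval_cases i <;> decide
    · have e1 : i - 3 = (i - 8) + 5 := by omega
      have e2 : i - 4 = (i - 9) + 5 := by omega
      rw [e1, e2, pvF_add5 _ (by omega), pvF_add5 _ (by omega)]
      have hih := ih (i - 5) (by omega) (by omega)
      have e3 : i - 5 - 3 = i - 8 := by omega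
      have e4 : i - 5 - 4 = i - 9 := by omega
      rw [e3, e4] at hih
      linarith

theorem pvIneq_c (i : Nat) (h : 16 ≤ i) : 3 * pvF (i - 4) ≤ 4 * pvF (i - 5) := by
  induction i using Nat.strong_induction_on with
  | _ i ih =>
    by_cases hs : i ≤ 20
    · interval_cases i <;> decide
    · have e1 : i - 4 = (i - 9) + 5 := by omega
      have e2 : i - 5 = (i - 10) + 5 := by omega
      rw [e1, e2, pvF_add5 _ (by omega), pvF_add5 _ (by omega)]
      have hih := ih (i - 5) (by omega) (by omega)
      have e3 : i - 5 - 4 = i - 9 := by omega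
      have e4 : i - 5 - 5 = i - 10 := by omega
      rw [e3, e4] at hih
      linarith

theorem pvIneq_d (i : Nat) (h : 16 ≤ i) : 5 * pvF (i - 6) < 4 * pvF (i - 5) := by
  induction i using Nat.strong_induction_on with
  | _ i ih =>
    by_cases hs : i ≤ 21
    · interval_cases i <;> decide
    · have e1 : i - 6 = (i - 11) + 5 := by omega
      have e2 : i - 5 = (i - 10) + 5 := by omega
      rw [e1, e2, pvF_add5 _ (by omega), pvF_add5 _ (by omega)]
      have hih := ih (i - 5) (by omega) (by omega)
      have e3 : i - 5 - 6 = i - 11 := by omega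
      have e4 : i - 5 - 5 = i - 10 := by omega
      rw [e3, e4] at hih
      linarith

-- A's inner loop, abstracted over the dp lookup
def pvStep (g : Int → Int) (st : Int × Int × Bool) (j : Int) : Int × Int × Bool :=
  if st.2.2 then st
  else if g j * st.2.1 ≥ st.1 then (g j * st.2.1, st.2.1 + 1, false)
  else (st.1, st.2.1, true)

theorem pvStep_stopped (g : Int → Int) (l : List Int) (st : Int × Int × Bool)
    (h : st.2.2 = true) : l.foldl (pvStep g) st = st := by
  induction l with
  | nil => rfl
  | cons x xs ihc => simp [List.foldl, pvStep, h, ihc]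

theorem pvF_small (k : Nat) (h : k ≤ 6) : pvF k = (k : Int) := by
  unfold pvF; rw [if_pos h]

theorem pvStep_take (g : Int → Int) (v c j : Int) (h : g j * c ≥ v) :
    pvStep g (v, c, false) j = (g j * c, c + 1, false) := by
  simp [pvStep, h]

theorem pvStep_break (g : Int → Int) (v c j : Int) (h : ¬ g j * c ≥ v) :
    pvStep g (v, c, false) j = (v, c, true) := by
  simp [pvStep, h]

theorem pvInner (i : Nat) (hi : 7 ≤ i) (g : Int → Int)
    (hg : ∀ j : Int, 1 ≤ j → j ≤ (i : Int) - 3 → g j = pvF j.toNat) :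
    ((PySem.List.pyRange ((i : Int) - 3) 0 (-1)).foldl (pvStep g) (0, 2, false)).1 = pvF i := by
  have hcongr : (PySem.List.pyRange ((i : Int) - 3) 0 (-1)).foldl (pvStep g) (0, 2, false)
      = (PySem.List.pyRange ((i : Int) - 3) 0 (-1)).foldl (pvStep (fun j => pvF j.toNat)) (0, 2, false) := by
    apply PySem.List.foldl_congr_mem
    intro acc x hx
    rw [PySem.List.mem_pyRange_neg_one] at hx
    unfold pvStep
    rw [hg x (by omega) (by omega)]
  rw [hcongr]
  by_cases hsm : i ≤ 15
  · interval_cases i <;> decide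
  · have h16 : 16 ≤ i := by omega
    have hFa : pvF ((i:Int)-3).toNat = pvF (i-3) := by congr 1; omega
    have hFb : pvF ((i:Int)-3-1).toNat = pvF (i-4) := by congr 1; omega
    have hFc : pvF ((i:Int)-3-1-1).toNat = pvF (i-5) := by congr 1; omega
    have hFd : pvF ((i:Int)-3-1-1-1).toNat = pvF (i-6) := by congr 1; omega
    have hb := pvIneq_b i h16
    have hc := pvIneq_c i h16
    have hd := pvIneq_d i h16
    rw [PySem.List.pyRange_neg_one_cons (by omega), PySem.List.pyRange_neg_one_cons (by omega),
        PySem.List.pyRange_neg_one_cons (by omega), PySem.List.pyRange_neg_one_cons (by omega)]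
    rw [List.foldl_cons,
        pvStep_take _ _ _ _ (by simp only [hFa]; exact mul_nonneg (pvF_nonneg _) (by norm_num))]
    rw [List.foldl_cons,
        pvStep_take _ _ _ _ (by simp only [hFa, hFb]; linarith)]
    rw [List.foldl_cons,
        pvStep_take _ _ _ _ (by simp only [hFb, hFc]; linarith)]
    rw [List.foldl_cons,
        pvStep_break _ _ _ _ (by simp only [hFc, hFd]; intro hcon; linarith)]
    rw [pvStep_stopped _ _ _ rfl]
    simp only [hFc]
    rw [show i = (i - 5) + 5 by omega, pvF_add5 _ (by omega), show (i - 5) + 5 - 5 = i - 5 by omega]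
    ring

-- the dp array after processing indices 7..m
def pvDp (n m : Nat) : List Int := (List.range n).map (fun k => if k ≤ m then pvF k else 0)

theorem pvDp_length (n m : Nat) : (pvDp n m).length = n := by
  simp [pvDp]

theorem pvDp_get (n m : Nat) (j : Int) (h0 : 0 ≤ j) (h1 : j < (n : Int)) :
    PySem.List.pyGetD (pvDp n m) j 0 = if j.toNat ≤ m then pvF j.toNat else 0 := by
  rw [PySem.List.pyGetD_eq_getElem (pvDp n m) 0 h0 (by rw [pvDp_length]; exact h1)]
  have hk : j.toNat < n := by omega
  simp [pvDp]

theorem pvDp_set (n m : Nat) (_h : m + 1 < n) :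
    (pvDp n m).set (m + 1) (pvF (m + 1)) = pvDp n (m + 1) := by
  apply List.ext_getElem (by simp [pvDp])
  intro k hk1 hk2
  simp only [pvDp, List.getElem_set, List.getElem_map, List.getElem_range]
  have hkn : k < n := by simpa [pvDp] using hk2
  split_ifs with e1 e2 e3 e4 e5 <;> first | rfl | omega | (subst e1; rfl)

theorem pvDp_init (N : Int) (_h : 7 ≤ N) :
    (PySem.List.pyRange 0 (N+1) 1).map (fun i => if i ≤ 6 then i else 0) = pvDp (N+1).toNat 6 := by
  rw [PySem.List.pyRange_one, List.map_map]
  unfold pvDp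
  rw [show (N + 1 - 0) = N + 1 by ring]
  apply List.map_congr_left
  intro k _
  simp only [Function.comp_apply, zero_add]
  by_cases hk : k ≤ 6
  · have h1 : ((k : Int)) ≤ 6 := by exact_mod_cast hk
    rw [if_pos h1, if_pos hk, pvF_small k hk]
  · have h1 : ¬ ((k : Int)) ≤ 6 := by exact_mod_cast hk
    rw [if_neg h1, if_neg hk]

theorem pvOuter (N : Int) (h7 : 7 ≤ N) (m : Nat) (h6 : 6 ≤ m) (hm : (m : Int) ≤ N) :
    (PySem.List.pyRange 7 ((m : Int) + 1) 1).foldl (fun dp i =>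
        PySem.List.pySetD dp i
          (((PySem.List.pyRange (i-3) 0 (-1)).foldl
            (fun (st : Int × Int × Bool) j =>
              if st.2.2 then st
              else if PySem.List.pyGetD dp j 0 * st.2.1 ≥ st.1 then
                (PySem.List.pyGetD dp j 0 * st.2.1, st.2.1 + 1, false)
              else (st.1, st.2.1, true))
            (PySem.List.pyGetD dp i 0, 2, false)).1)) (pvDp (N+1).toNat 6) = pvDp (N+1).toNat m := by
  induction m, h6 using Nat.le_induction with
  | base =>
    rw [PySem.List.pyRange_one_eq_nil (by norm_num)]
    rfl
  | succ m h6 ih =>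
    have hmN : (m : Int) ≤ N := by push_cast at hm ⊢; omega
    rw [show ((m + 1 : Nat) : Int) + 1 = ((m : Int) + 1) + 1 by push_cast; ring,
        PySem.List.pyRange_one_succ_right (by omega), List.foldl_append, ih hmN,
        List.foldl_cons, List.foldl_nil]
    have hn1 : ((m : Int) + 1) < (((N+1).toNat : Nat) : Int) := by omega
    have hinit : PySem.List.pyGetD (pvDp (N+1).toNat m) ((m : Int) + 1) 0 = 0 := by
      rw [pvDp_get _ _ _ (by omega) hn1, if_neg (by omega)]
    rw [hinit]
    have hfold : ((PySem.List.pyRange ((m : Int) + 1 - 3) 0 (-1)).foldl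
          (fun (st : Int × Int × Bool) j =>
            if st.2.2 then st
            else if PySem.List.pyGetD (pvDp (N+1).toNat m) j 0 * st.2.1 ≥ st.1 then
              (PySem.List.pyGetD (pvDp (N+1).toNat m) j 0 * st.2.1, st.2.1 + 1, false)
            else (st.1, st.2.1, true)) (0, 2, false)).1 = pvF (m + 1) := by
      have := pvInner (m + 1) (by omega) (fun j => PySem.List.pyGetD (pvDp (N+1).toNat m) j 0)
        (by
          intro j hj1 hj2
          push_cast at hj2
          show PySem.List.pyGetD (pvDp (N+1).toNat m) j 0 = pvF j.toNat
          rw [pvDp_get _ _ _ (by omega) (by omega), if_pos (by omega)])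
      rw [show ((m + 1 : Nat) : Int) - 3 = (m : Int) + 1 - 3 by push_cast; ring] at this
      exact this
    rw [hfold]
    rw [show ((m : Int) + 1) = (((m + 1 : Nat) : Nat) : Int) by push_cast; ring,
        PySem.List.pySetD_natCast]
    exact pvDp_set _ _ (by omega)

theorem optimalKeys_eq_pvF (N : Int) (h : 7 ≤ N) : optimalKeys N = pvF N.toNat := by
  unfold optimalKeys
  rw [if_neg (by omega)]
  dsimp only
  rw [pvDp_init N h]
  have hout := pvOuter N h N.toNat (by omega) (by omega)
  rw [show ((N.toNat : Int) + 1) = N + 1 by omega] at hout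
  rw [hout]
  rw [show N = ((N.toNat : Nat) : Int) by omega]
  rw [pvDp_get _ _ _ (by omega) (by omega)]
  rw [if_pos (by omega)]

theorem optimalKeys_alt_eq_pvF (N : Int) (h : 7 ≤ N) : optimalKeys_alt N = pvF N.toNat := by
  unfold optimalKeys_alt
  rw [if_neg (by omega)]
  by_cases h10 : N ≤ 10
  · rw [if_pos h10]
    interval_cases N <;> decide
  · rw [if_neg h10]
    dsimp only
    obtain ⟨k, hk⟩ : ∃ k : Nat, N - 11 = (k : Int) := ⟨(N - 11).toNat, by omega⟩
    rw [hk]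
    rw [PySem.Int.floordiv_eq_ediv_of_pos (by norm_num : (0:Int) < 5),
        PySem.Int.mod_eq_emod_of_pos (by norm_num : (0:Int) < 5)]
    rw [show ((k : Int) / 5) = ((k / 5 : Nat) : Int) by exact_mod_cast (Int.natCast_div k 5).symm,
        show ((k : Int) % 5) = ((k % 5 : Nat) : Int) by exact_mod_cast (Int.natCast_mod k 5).symm]
    rw [show N.toNat = k + 11 by omega, pvF_ge11 (k + 11) (by omega),
        show k + 11 - 11 = k by omega]
    rw [Int.toNat_natCast]
    have h5 : k % 5 < 5 := Nat.mod_lt _ (by norm_num)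
    rw [PySem.List.pyGetD_natCast]
    interval_cases hr : k % 5 <;> norm_num [pvB]

-- ===== VERDICT (by name: the statement is the Claim_ definition above) =====
theorem optimalKeys_spec : Claim_equal_optimalKeys := by
  intro N _
  unfold Spec_optimalKeys
  by_cases h : N ≤ 6
  · simp [optimalKeys, optimalKeys_alt, h]
  · rw [optimalKeys_eq_pvF N (by omega), optimalKeys_alt_eq_pvF N (by omega)]
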